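-- pv_equiv track=rewrite | github.com/karashow/QS | sistemi.py | crea_sol
-- ===== SOURCE A (Python) =====
-- def zero(n):
--     z=[]
--     for i in range(n):
--         z.append(0)
--     return z
--
-- def vect(indice, n):
--     vettore = zero(n)
--     vettore[indice] = 1
--     return vettore
--
-- def somma(v, w):
--     a = zero(len(v))
--     for i in range(len(v)):
--         a[i] = v[i] + w[i]
--     return a
--
-- def crea_sol(Y, n):
--     sol = []
--     if Y == []:
--         sol.append(zero(n))
--     else:
--         index = Y[0]
--         Y.pop(0)
--         sol_prec = crea_sol(Y, n)
--         for elem in sol_prec: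
--             sol.append(elem)
--             sol.append(somma(elem, vect(index, n)))
--     return sol
-- ===== SOURCE B (Python) =====
-- def crea_sol(Y, n):
--     # Iterative doubling instead of recursion; drains Y via pop() like the original.
--     sol = [[0] * n]
--     while Y:
--         index = Y.pop()
--         sol = [w for e in sol for w in (e, _bump(e, index))]
--     return sol
--
-- def _bump(e, index):
--     w = list(e)
--     w[index] += 1
--     return w
-- ===== Notes on version B (the rewrite author's own statement) =====
-- stated objective: alternative
-- what changed: Replaces A's head-first recursion (with per-element zero/vect/somma vector construction) by an iterative doubling loop that pops indices off the end of Y and doubles the solution list in place, bumping one entry of a copied vector instead of building and adding an indicator vector.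
import Mathlib
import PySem

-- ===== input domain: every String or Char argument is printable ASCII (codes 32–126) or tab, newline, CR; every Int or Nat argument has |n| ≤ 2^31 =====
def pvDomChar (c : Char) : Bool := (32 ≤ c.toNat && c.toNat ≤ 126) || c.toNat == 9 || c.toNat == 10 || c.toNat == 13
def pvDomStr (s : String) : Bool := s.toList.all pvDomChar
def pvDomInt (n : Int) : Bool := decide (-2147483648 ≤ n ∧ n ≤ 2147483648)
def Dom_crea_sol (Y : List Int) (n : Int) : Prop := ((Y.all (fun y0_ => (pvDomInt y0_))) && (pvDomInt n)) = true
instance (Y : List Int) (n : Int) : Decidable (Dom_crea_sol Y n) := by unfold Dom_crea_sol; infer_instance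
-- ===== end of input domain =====

-- B replaces the head-recursion of A by an iterative doubling loop that pops indices
-- from the end of Y; equivalence is about the RETURN value (both A and B empty Y in Python).

-- ===== PORT A =====
def zeroA (n : Int) : List Int :=
  (PySem.List.pyRange 0 n 1).foldl (fun z _ => z ++ [(0 : Int)]) []

def vectA (indice : Int) (n : Int) : List Int :=
  PySem.List.pySetD (zeroA n) indice 1

def sommaA (v w : List Int) : List Int :=
  (PySem.List.pyRange 0 (PySem.List.len v) 1).foldl
    (fun a i => PySem.List.pySetD a i (PySem.List.pyGetD v i 0 + PySem.List.pyGetD w i 0))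
    (zeroA (PySem.List.len v))

def crea_sol (Y : List Int) (n : Int) : List (List Int) :=
  match Y with
  | [] => [zeroA n]
  | index :: Y' =>
      (crea_sol Y' n).foldl
        (fun sol elem => sol ++ [elem] ++ [sommaA elem (vectA index n)]) []

-- ===== PORT B =====
def bumpB (e : List Int) (index : Int) : List Int :=
  PySem.List.pySetD e index (PySem.List.pyGetD e index 0 + 1)

def bLoop (Y : List Int) (sol : List (List Int)) : List (List Int) :=
  if hY : Y = [] then sol
  else bLoop Y.dropLast (sol.flatMap (fun e => [e, bumpB e (Y.getLast hY)]))
termination_by Y.length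
decreasing_by
  have : 0 < Y.length := List.length_pos_iff.mpr hY
  simp [List.length_dropLast]; omega

def crea_sol_alt (Y : List Int) (n : Int) : List (List Int) :=
  bLoop Y [List.replicate n.toNat 0]

-- ===== PRECONDITION & SPEC =====
-- Pre_ excludes exactly the inputs on which A raises IndexError: some index in Y is out of
-- range for a vector of length max(n,0) (Python indexing, negative indices allowed).
def Pre_crea_sol (Y : List Int) (n : Int) : Prop :=
  ∀ i ∈ Y, PySem.Raise.InRange n.toNat i
instance (Y : List Int) (n : Int) : Decidable (Pre_crea_sol Y n) := by
  unfold Pre_crea_sol; infer_instance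

def pvWitness_crea_sol : List Int × Int := ([0, 1], 2)

def Spec_crea_sol (Y : List Int) (n : Int) (out : List (List Int)) : Prop := out = crea_sol_alt Y n
instance (Y : List Int) (n : Int) (out : List (List Int)) : Decidable (Spec_crea_sol Y n out) := by unfold Spec_crea_sol; infer_instance

-- ===== CLAIM (what is proved, stated in full; the proofs are below) =====
def Claim_equal_crea_sol : Prop := ∀ (Y : List Int) (n : Int), Dom_crea_sol Y n → Pre_crea_sol Y n → Spec_crea_sol Y n (crea_sol Y n)

-- ===== LEMMAS AND PROOFS =====

-- the index Python resolves a (possibly negative) in-range index to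
def resIdx (L : Nat) (i : Int) : Nat := if 0 ≤ i then i.toNat else L - (-i).toNat

theorem resIdx_lt (L : Nat) (i : Int) (h : PySem.Raise.InRange L i) : resIdx L i < L := by
  obtain ⟨h1, h2⟩ := h
  unfold resIdx
  split <;> omega

theorem pyIdx?_inRange (L : Nat) (i : Int) (h : PySem.Raise.InRange L i) :
    PySem.List.pyIdx? L i = some (resIdx L i) := by
  obtain ⟨h1, h2⟩ := h
  unfold PySem.List.pyIdx? resIdx
  by_cases hi : 0 ≤ i
  · rw [if_pos hi, if_pos h2, if_pos hi]
  · rw [if_neg hi, if_pos h1, if_neg hi]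

theorem pySetD_inRange {α : Type} (xs : List α) (i : Int) (v : α)
    (h : PySem.Raise.InRange xs.length i) :
    PySem.List.pySetD xs i v = xs.set (resIdx xs.length i) v := by
  simp [PySem.List.pySetD, PySem.List.pySet?, pyIdx?_inRange _ _ h]

theorem pyGetD_inRange {α : Type} (xs : List α) (i : Int) (d : α)
    (h : PySem.Raise.InRange xs.length i) :
    PySem.List.pyGetD xs i d = xs.getD (resIdx xs.length i) d := by
  have hlt := resIdx_lt xs.length i h
  simp [PySem.List.pyGetD, PySem.List.pyGet?, pyIdx?_inRange _ _ h,
        List.getElem?_eq_getElem hlt]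

theorem zeroA_eq (n : Int) : zeroA n = List.replicate n.toNat 0 := by
  unfold zeroA
  rw [PySem.List.foldl_append_singleton_eq_map (fun _ => (0 : Int))]
  simp [List.map_const', PySem.List.length_pyRange_one]

-- the inner loop of somma computes the pointwise sum prefix by prefix
theorem sommaA_loop (v w : List Int) (hw : w.length = v.length) (m : Nat) (hm : m ≤ v.length) :
    (PySem.List.pyRange 0 (m : Int) 1).foldl
      (fun a i => PySem.List.pySetD a i (PySem.List.pyGetD v i 0 + PySem.List.pyGetD w i 0))
      (List.replicate v.length 0)
    = (List.zipWith (· + ·) v w).take m ++ List.replicate (v.length - m) 0 := by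
  induction m with
  | zero => simp [PySem.List.pyRange_one_eq_nil]
  | succ k ih =>
    have hk : k ≤ v.length := by omega
    have hklt : k < v.length := by omega
    have hcast : ((k + 1 : Nat) : Int) = (k : Int) + 1 := by push_cast; ring
    rw [hcast, PySem.List.pyRange_one_succ_right (by positivity), List.foldl_append, ih hk]
    simp only [List.foldl_cons, List.foldl_nil]
    have hzw : (List.zipWith (· + ·) v w).length = v.length := by
      simp [List.length_zipWith, hw]
    rw [PySem.List.pySetD_natCast, PySem.List.pyGetD_natCast, PySem.List.pyGetD_natCast,
        List.set_append]
    have hlen : ((List.zipWith (· + ·) v w).take k).length = k := by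
      rw [List.length_take, hzw]; omega
    rw [if_neg (by omega)]
    have hrep : List.replicate (v.length - k) (0 : Int)
        = 0 :: List.replicate (v.length - (k + 1)) 0 := by
      have : v.length - k = (v.length - (k + 1)) + 1 := by omega
      rw [this, List.replicate_succ]
    rw [hlen, Nat.sub_self, hrep, List.set_cons_zero]
    rw [List.take_add_one, List.getElem?_eq_getElem (by omega)]
    simp [List.getElem_zipWith, List.getElem?_eq_getElem hklt,
          List.getElem?_eq_getElem (show k < w.length by omega)]

theorem sommaA_eq_zipWith (v w : List Int) (hw : w.length = v.length) :
    sommaA v w = List.zipWith (· + ·) v w := by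
  unfold sommaA
  rw [PySem.List.len_eq, zeroA_eq]
  have hzw : (List.zipWith (· + ·) v w).length = v.length := by
    simp [List.length_zipWith, hw]
  have := sommaA_loop v w hw v.length le_rfl
  simp only [Int.toNat_natCast] at this ⊢
  rw [this, Nat.sub_self, List.replicate_zero, List.append_nil, ← hzw, List.take_length]

-- on a vector of the right length, adding the indicator vector is bumping one entry
theorem step_eq (e : List Int) (i n : Int) (he : e.length = n.toNat)
    (hi : PySem.Raise.InRange n.toNat i) :
    sommaA e (vectA i n) = bumpB e i := by
  have hie : PySem.Raise.InRange e.length i := by rw [he]; exact hi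
  have hv : vectA i n = (List.replicate n.toNat (0 : Int)).set (resIdx n.toNat i) 1 := by
    unfold vectA
    rw [zeroA_eq, pySetD_inRange _ _ _ (by simpa using hi), List.length_replicate]
  have hvlen : (vectA i n).length = e.length := by rw [hv]; simp [he]
  have hjeq : resIdx e.length i = resIdx n.toNat i := by rw [he]
  have hj : resIdx n.toNat i < e.length := by
    rw [he]; exact resIdx_lt _ _ hi
  rw [sommaA_eq_zipWith e _ hvlen]
  unfold bumpB
  rw [pySetD_inRange _ _ _ hie, pyGetD_inRange _ _ _ hie, hjeq, hv]
  apply List.ext_getElem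
  · simp [List.length_zipWith, he]
  · intro k h1 h2
    have hk : k < e.length := by
      rw [List.length_set] at h2; exact h2
    simp only [List.getElem_zipWith, List.getElem_set, List.getElem_replicate]
    simp only [List.getD_eq_getElem e 0 hj]
    by_cases hkj : resIdx n.toNat i = k
    · subst hkj; simp
    · simp [hkj]

-- A's inner append loop is an interleaving flatMap
theorem creaA_cons (index : Int) (Y : List Int) (n : Int) :
    crea_sol (index :: Y) n
    = (crea_sol Y n).flatMap (fun e => [e, sommaA e (vectA index n)]) := by
  show (crea_sol Y n).foldl
      (fun sol elem => sol ++ [elem] ++ [sommaA elem (vectA index n)]) [] = _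
  have : ∀ (l : List (List Int)),
      l.foldl (fun sol elem => sol ++ [elem] ++ [sommaA elem (vectA index n)]) []
      = l.foldl (fun sol elem => sol ++ ([elem] ++ [sommaA elem (vectA index n)])) [] := by
    intro l; congr 1; funext sol elem; rw [List.append_assoc]
  rw [this, PySem.List.foldl_append_eq_flatMap]
  simp

-- B's while/pop loop is a right fold over Y
theorem bLoop_eq (Y : List Int) (sol : List (List Int)) :
    bLoop Y sol = Y.foldr (fun i s => s.flatMap (fun e => [e, bumpB e i])) sol := by
  induction Y using List.reverseRecOn generalizing sol with
  | nil => rw [bLoop]; simp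
  | append_singleton Y' i ih =>
    rw [bLoop, dif_neg (by simp)]
    simp only [List.getLast_concat, List.dropLast_concat]
    rw [ih, List.foldr_append]
    rfl

theorem crea_eq_and_len (Y : List Int) (n : Int) (h : Pre_crea_sol Y n) :
    crea_sol Y n = crea_sol_alt Y n ∧ ∀ e ∈ crea_sol Y n, e.length = n.toNat := by
  induction Y with
  | nil =>
    constructor
    · show [zeroA n] = bLoop [] [List.replicate n.toNat 0]
      rw [bLoop, zeroA_eq]
      simp
    · intro e he
      simp only [crea_sol, List.mem_singleton] at he
      rw [he, zeroA_eq]; simp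
  | cons i Y' ih =>
    have hi : PySem.Raise.InRange n.toNat i := h i (List.mem_cons_self)
    have hY' : Pre_crea_sol Y' n := fun j hj => h j (List.mem_cons_of_mem _ hj)
    obtain ⟨heq, hlen⟩ := ih hY'
    have hmap : (crea_sol Y' n).flatMap (fun e => [e, sommaA e (vectA i n)])
        = (crea_sol Y' n).flatMap (fun e => [e, bumpB e i]) := by
      apply List.flatMap_congr
      intro e he
      rw [step_eq e i n (hlen e he) hi]
    constructor
    · rw [creaA_cons, hmap, heq]
      unfold crea_sol_alt
      simp only [bLoop_eq, List.foldr_cons]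
    · intro e he
      rw [creaA_cons, List.mem_flatMap] at he
      obtain ⟨x, hx, hex⟩ := he
      have hxl := hlen x hx
      simp only [List.mem_cons, List.not_mem_nil, or_false] at hex
      rcases hex with rfl | rfl
      · exact hxl
      · rw [step_eq x i n hxl hi]
        unfold bumpB
        rw [pySetD_inRange _ _ _ (by rw [hxl]; exact hi)]
        simp [hxl]

-- ===== VERDICT (by name: the statement is the Claim_ definition above) =====
theorem crea_sol_spec : Claim_equal_crea_sol := by
  intro Y n _ hpre
  show crea_sol Y n = crea_sol_alt Y n
  exact (crea_eq_and_len Y n hpre).1
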